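-- pv_equiv track=rewrite | github.com/xuao1/open-gpu-kernel-modules-535.104.05 | kernel-open/nvidia-drm/add_printk.py | insert_debug_info
-- ===== SOURCE A (Python) =====
-- def insert_debug_info(c_code, cnt):
--     lines = c_code.split('\n')
--     modified_lines = []
--     in_function = False
--     potential_function_start = False
--
--     for i, line in enumerate(lines):
--         modified_lines.append(line)
--
--         if ')' in line:
--             potential_function_start = True
--         elif potential_function_start and line.strip().startswith('{'):
--             modified_lines.append('    printk(KERN_ERR "nvidia-drm =====================================   %d\\n", ' + str(cnt) + ');')
--             cnt += 1
--             potential_function_start = False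
--         elif not line.strip().startswith('{'):
--             potential_function_start = False
--
--     return '\n'.join(modified_lines), cnt
-- ===== SOURCE B (Python) =====
-- PRINTK = '    printk(KERN_ERR "nvidia-drm =====================================   %d\\n", '
--
--
-- def insert_debug_info(c_code, cnt):
--     lines = c_code.split('\n')
--     # pass 1: mark each line that needs a printk after it, from consecutive pairs
--     marks = [False] + [(')' in prev) and (')' not in cur)
--                        and cur.strip().startswith('{')
--                        for prev, cur in zip(lines, lines[1:])]
--     # pass 2: rebuild, numbering the inserted printks in order
--     out = []
--     k = cnt
--     for line, m in zip(lines, marks):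
--         out.append(line)
--         if m:
--             out.append(PRINTK + str(k) + ');')
--             k += 1
--     return '\n'.join(out), k
-- ===== Notes on version B (the rewrite author's own statement) =====
-- stated objective: alternative
-- what changed: Replaces the three-branch running-flag state machine with a two-pass decomposition: a first pass over consecutive line pairs marks where a printk must be inserted (the flag provably equals "')' in previous line"), and a second pass rebuilds the output, numbering the inserted printks in order.
import Mathlib
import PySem

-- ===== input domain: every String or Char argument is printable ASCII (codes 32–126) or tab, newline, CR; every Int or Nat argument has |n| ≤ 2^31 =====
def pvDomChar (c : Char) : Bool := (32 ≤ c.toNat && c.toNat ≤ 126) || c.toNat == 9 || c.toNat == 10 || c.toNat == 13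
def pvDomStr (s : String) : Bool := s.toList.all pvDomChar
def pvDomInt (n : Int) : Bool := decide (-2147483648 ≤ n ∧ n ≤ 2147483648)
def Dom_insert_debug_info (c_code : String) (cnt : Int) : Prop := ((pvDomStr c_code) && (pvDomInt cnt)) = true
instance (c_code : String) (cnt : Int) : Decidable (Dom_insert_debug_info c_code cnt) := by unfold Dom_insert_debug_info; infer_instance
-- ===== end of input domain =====

-- B replaces A's running-flag state machine with a two-pass mark-then-rebuild decomposition (alternative, same cost).


-- the printk line inserted with counter value c (shared text of both sources)
def pvPrintk (c : Int) : String :=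
  "    printk(KERN_ERR \"nvidia-drm =====================================   %d\\n\", "
    ++ PySem.Int.toStr c ++ ");"

-- ===== PORT A =====
-- A's loop: state = (modified_lines, potential_function_start, cnt), branches in source order
def pvLoopA : List String → List String → Bool → Int → List String × Int
  | [], acc, _, c => (acc, c)
  | l :: rest, acc, pot, c =>
    let acc2 := acc ++ [l]
    if PySem.Str.isIn ")" l then
      pvLoopA rest acc2 true c
    else if pot && PySem.Str.startswith (PySem.Str.strip l) "{" then
      pvLoopA rest (acc2 ++ [pvPrintk c]) false (c + 1)
    else if !(PySem.Str.startswith (PySem.Str.strip l) "{") then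
      pvLoopA rest acc2 false c
    else
      pvLoopA rest acc2 pot c

def insert_debug_info (c_code : String) (cnt : Int) : String × Int :=
  let lines := (PySem.Str.split? c_code "\n").getD []  -- sep ≠ "": never none
  let r := pvLoopA lines [] false cnt
  (PySem.Str.join "\n" r.1, r.2)

-- ===== PORT B =====
-- B pass 1: mark of a (prev, cur) pair
def pvMark (p c : String) : Bool :=
  PySem.Str.isIn ")" p && !(PySem.Str.isIn ")" c)
    && PySem.Str.startswith (PySem.Str.strip c) "{"

-- B pass 2: rebuild from (line, mark) pairs, numbering inserted printks in order
def pvRebuild : List (String × Bool) → List String → Int → List String × Int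
  | [], out, k => (out, k)
  | (l, m) :: rest, out, k =>
    let out2 := out ++ [l]
    if m then pvRebuild rest (out2 ++ [pvPrintk k]) (k + 1)
    else pvRebuild rest out2 k

def insert_debug_info_alt (c_code : String) (cnt : Int) : String × Int :=
  let lines := (PySem.Str.split? c_code "\n").getD []  -- sep ≠ "": never none
  let marks := false :: (lines.zip lines.tail).map (fun pc => pvMark pc.1 pc.2)
  let r := pvRebuild (lines.zip marks) [] cnt
  (PySem.Str.join "\n" r.1, r.2)

-- ===== PRECONDITION & SPEC =====
def Spec_insert_debug_info (c_code : String) (cnt : Int) (out : String × Int) : Prop := out = insert_debug_info_alt c_code cnt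
instance (c_code : String) (cnt : Int) (out : String × Int) : Decidable (Spec_insert_debug_info c_code cnt out) := by unfold Spec_insert_debug_info; infer_instance

-- ===== CLAIM (what is proved, stated in full; the proofs are below) =====
def Claim_equal_insert_debug_info : Prop := ∀ (c_code : String) (cnt : Int), Dom_insert_debug_info c_code cnt → Spec_insert_debug_info c_code cnt (insert_debug_info c_code cnt)

-- ===== LEMMAS AND PROOFS =====

-- A's flag after each line equals "')' in that line"; marksFrom threads that invariant
def pvMarksFrom : Bool → List String → List Bool
  | _, [] => []
  | pot, l :: rest =>
    (pot && !(PySem.Str.isIn ")" l) && PySem.Str.startswith (PySem.Str.strip l) "{")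
      :: pvMarksFrom (PySem.Str.isIn ")" l) rest

theorem pvLoopA_eq_rebuild (lines : List String) :
    ∀ (acc : List String) (pot : Bool) (c : Int),
      pvLoopA lines acc pot c = pvRebuild (lines.zip (pvMarksFrom pot lines)) acc c := by
  induction lines with
  | nil => intro acc pot c; simp [pvLoopA, pvMarksFrom, pvRebuild]
  | cons l rest ih =>
    intro acc pot c
    by_cases h1 : PySem.Chars.isIn [')'] l.toList = true
    · simp [pvLoopA, pvMarksFrom, pvRebuild, h1, ih]
    · by_cases h3 : PySem.Chars.startswith (PySem.Chars.strip l.toList) ['{'] = true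
      · cases pot
        · simp [pvLoopA, pvMarksFrom, pvRebuild, h1, h3, ih]
        · simp [pvLoopA, pvMarksFrom, pvRebuild, h1, h3, ih]
      · simp [pvLoopA, pvMarksFrom, pvRebuild, h1, h3, ih]

theorem pvMarksFrom_eq_map (rest : List String) :
    ∀ p : String,
      pvMarksFrom (PySem.Chars.isIn [')'] p.toList) rest
        = ((p :: rest).zip rest).map (fun pc => pvMark pc.1 pc.2) := by
  induction rest with
  | nil => intro p; simp [pvMarksFrom]
  | cons c rs ih => intro p; simp [pvMarksFrom, pvMark, ih c, Bool.and_assoc]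

theorem pvZip_marks (lines : List String) :
    lines.zip (pvMarksFrom false lines)
      = lines.zip (false :: (lines.zip lines.tail).map (fun pc => pvMark pc.1 pc.2)) := by
  cases lines with
  | nil => rfl
  | cons l rest => simp [pvMarksFrom, pvMarksFrom_eq_map rest l]

-- ===== VERDICT (by name: the statement is the Claim_ definition above) =====
theorem insert_debug_info_spec : Claim_equal_insert_debug_info := by
  intro c_code cnt _
  unfold Spec_insert_debug_info insert_debug_info insert_debug_info_alt
  simp only [pvLoopA_eq_rebuild, pvZip_marks]
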